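-- pv_equiv track=rewrite | github.com/SelfPrivacy/selfprivacy-api | selfprivacy_api/backup/restic_backuper.py | json_start
-- ===== SOURCE A (Python) =====
-- def json_start(output: str) -> int:
--     indices = [
--         output.find("["),
--         output.find("{"),
--     ]
--     indices = [x for x in indices if x != -1]
--
--     if indices == []:
--         return -1
--     return min(indices)
-- ===== SOURCE B (Python) =====
-- def json_start(output: str) -> int:
--     for i, c in enumerate(output):
--         if c == "[" or c == "{":
--             return i
--     return -1
-- ===== Notes on version B (the rewrite author's own statement) =====
-- stated objective: simpler
-- what changed: Replaces two full substring scans combined by filter+min with a single left-to-right pass that returns the first index whose character is '[' or '{'.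
import Mathlib
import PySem

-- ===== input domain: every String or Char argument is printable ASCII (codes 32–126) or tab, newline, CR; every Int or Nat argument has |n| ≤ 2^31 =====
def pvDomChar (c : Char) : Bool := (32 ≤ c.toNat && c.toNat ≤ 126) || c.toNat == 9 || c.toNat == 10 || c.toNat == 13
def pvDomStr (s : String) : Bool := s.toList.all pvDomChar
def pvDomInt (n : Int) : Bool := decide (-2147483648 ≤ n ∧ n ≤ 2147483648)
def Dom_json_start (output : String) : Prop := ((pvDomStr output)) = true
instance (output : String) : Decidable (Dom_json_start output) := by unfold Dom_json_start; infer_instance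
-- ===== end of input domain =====

-- B replaces A's two full substring scans combined by filter+min with one left-to-right pass
-- returning the first index whose character is '[' or '{' (objective: simpler).

-- ===== PORT A =====
def json_start (output : String) : Int :=
  let indices : List Int := [PySem.Str.find output "[", PySem.Str.find output "{"]
  let indices := indices.filter (fun x => x != -1)
  if indices = [] then -1
  else (PySem.List.min? indices (fun x => x)).getD (-1)

-- ===== PORT B =====
def jsonStartAux : List Char → Nat → Int
  | [], _ => -1
  | c :: rest, i => if c = '[' ∨ c = '{' then (i : Int) else jsonStartAux rest (i + 1)

def json_start_alt (output : String) : Int :=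
  jsonStartAux output.toList 0

-- ===== PRECONDITION & SPEC =====
def Spec_json_start (output : String) (out : Int) : Prop := out = json_start_alt output
instance (output : String) (out : Int) : Decidable (Spec_json_start output out) := by unfold Spec_json_start; infer_instance

-- ===== CLAIM (what is proved, stated in full; the proofs are below) =====
def Claim_equal_json_start : Prop := ∀ (output : String), Dom_json_start output → Spec_json_start output (json_start output)

-- ===== LEMMAS AND PROOFS =====

-- [c] is a prefix of l iff l starts with c
theorem singleton_prefix_iff (c : Char) (l : List Char) : [c] <+: l ↔ l.head? = some c := by
  cases l with
  | nil => simp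
  | cons a t => simp [List.cons_prefix_cons, eq_comm]

-- PySem.Chars.find for a single-character needle is the first index of that character
theorem find_singleton (cs : List Char) (c : Char) :
    PySem.Chars.find cs [c] =
      (match cs.findIdx? (· == c) with
       | some n => (n : Int)
       | none => -1) := by
  cases hf : cs.findIdx? (· == c) with
  | none =>
    have hmem : c ∉ cs := by
      intro hc
      rcases List.getElem_of_mem hc with ⟨i, hi, hval⟩
      have := List.findIdx?_eq_none_iff.mp hf
      have := this _ (List.mem_iff_getElem.mpr ⟨i, hi, hval⟩)
      simp at this
    simp only []
    rw [PySem.Chars.find_eq_neg_one_iff]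
    intro hinf
    exact hmem ((List.singleton_sublist).mp hinf.sublist)
  | some n =>
    rw [List.findIdx?_eq_some_iff_getElem] at hf
    rcases hf with ⟨hn, hpn, hmin⟩
    have hc : c ∈ cs := by
      have : cs[n] = c := by simpa using hpn
      exact this ▸ List.getElem_mem hn
    have hinf : [c] <:+: cs := by
      rcases List.append_of_mem hc with ⟨s, t, rfl⟩
      exact ⟨s, t, by simp⟩
    have hnn : 0 ≤ PySem.Chars.find cs [c] := (PySem.Chars.find_nonneg_iff cs [c]).mpr hinf
    rcases PySem.Chars.find_spec (s := cs) (sub := [c]) hnn with ⟨hpre, hlt⟩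
    set m := (PySem.Chars.find cs [c]).toNat with hm
    have key : ∀ j : Nat, [c] <+: cs.drop j ↔ cs[j]? = some c := by
      intro j
      rw [singleton_prefix_iff, List.head?_drop]
    have h1 : ¬ n < m := by
      intro hlt'
      exact (hlt n hlt') ((key n).mpr (by rw [List.getElem?_eq_getElem hn]; simpa using hpn))
    have h2 : ¬ m < n := by
      intro hlt'
      have := (key m).mp hpre
      have hmlen : m < cs.length := by
        by_contra h
        rw [List.getElem?_eq_none (by omega)] at this
        simp at this
      have : (· == c) cs[m] = true := by
        rw [List.getElem?_eq_getElem hmlen] at this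
        simpa using Option.some.inj this
      exact hmin m hlt' this
    have : m = n := by omega
    simp only []
    omega

-- the one-pass loop in terms of findIdx? over the disjunction
theorem jsonStartAux_eq (cs : List Char) (i : Nat) :
    jsonStartAux cs i =
      (match cs.findIdx? (fun c => c == '[' || c == '{') with
       | some n => ((i + n : Nat) : Int)
       | none => -1) := by
  induction cs generalizing i with
  | nil => simp [jsonStartAux]
  | cons a t ih =>
    by_cases h : a = '[' ∨ a = '{'
    · rcases h with h | h <;> simp [jsonStartAux, h, List.findIdx?_cons]
    · rw [show jsonStartAux (a :: t) i = jsonStartAux t (i + 1) from if_neg h]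
      rw [ih]
      simp only [List.findIdx?_cons]
      rw [if_neg (by simpa using h)]
      cases t.findIdx? (fun c => c == '[' || c == '{') <;> simp [Option.map] <;> ring

-- findIdx? of a disjunction is the min-combination of the two findIdx?s
theorem findIdx?_or (cs : List Char) :
    cs.findIdx? (fun c => c == '[' || c == '{') =
      (match cs.findIdx? (· == '['), cs.findIdx? (· == '{') with
       | some a, some b => some (min a b)
       | some a, none => some a
       | none, some b => some b
       | none, none => none) := by
  induction cs with
  | nil => simp
  | cons a t ih =>
    simp only [List.findIdx?_cons]
    by_cases h1 : a = '[' <;> by_cases h2 : a = '{' <;>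
      simp only [h1, h2, beq_iff_eq, if_true, if_false, Bool.true_or, Bool.or_true,
        ih, beq_self_eq_true] <;>
      [skip; skip; skip;
       (cases t.findIdx? (· == '[') <;> cases t.findIdx? (· == '{') <;>
         simp [Option.map, Nat.succ_min_succ])] <;>
      simp [h1, h2] <;>
      cases t.findIdx? (· == '[') <;> cases t.findIdx? (· == '{') <;> simp

-- ===== VERDICT (by name: the statement is the Claim_ definition above) =====
theorem json_start_spec : Claim_equal_json_start := by
  intro output _
  unfold Spec_json_start json_start json_start_alt
  rw [jsonStartAux_eq, findIdx?_or]
  have hA : PySem.Str.find output "[" =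
      (match output.toList.findIdx? (· == '[') with
       | some n => (n : Int) | none => -1) := by
    simpa using find_singleton output.toList '['
  have hB : PySem.Str.find output "{" =
      (match output.toList.findIdx? (· == '{') with
       | some n => (n : Int) | none => -1) := by
    simpa using find_singleton output.toList '{'
  rw [hA, hB]
  have key : ∀ n : Nat, ((n : Int) != -1) = true := by intro n; simp
  cases output.toList.findIdx? (· == '[') <;> cases output.toList.findIdx? (· == '{')
  · simp [List.filter]
  · rename_i b; simp [List.filter, key b, PySem.List.min?_id_cons]
  · rename_i a; simp [List.filter, key a, PySem.List.min?_id_cons]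
  · rename_i a b
    simp [List.filter, key a, key b, PySem.List.min?_id_cons]
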